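-- pv_equiv track=rewrite | github.com/Mehrdadghassabi/Gaokerena-V | corpus/seebmagazine/main.py | remove_nested_curly_braces
-- ===== SOURCE A (Python) =====
-- def remove_nested_curly_braces(text):
--     stack = []
--     result = []
--     i = 0
--     substring_to_remove = """.IRPP_ruby , .IRPP_ruby .postImageUrl , .IRPP_ruby .centered-text-area  .IRPP_ruby , .IRPP_ruby:hover , .IRPP_ruby:visited , .IRPP_ruby:active  .IRPP_ruby .clearfix:after  .IRPP_ruby  .IRPP_ruby:active , .IRPP_ruby:hover  .IRPP_ruby .postImageUrl  .IRPP_ruby .centered-text-area  .IRPP_ruby .centered-text  .IRPP_ruby .IRPP_ruby-content  .IRPP_ruby .ctaText  .IRPP_ruby .postTitle  .IRPP_ruby .ctaButton  .IRPP_ruby .ctaButton  .IRPP_ruby:after"""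
--     while i < len(text):
--         if text[i] == '{':
--             stack.append(len(result))
--         elif text[i] == '}':
--             if stack:
--                 start_index = stack.pop()
--                 result = result[:start_index]
--         else:
--             if not stack:
--                 result.append(text[i])
--         i += 1
--
--     return ''.join(result).replace(substring_to_remove, '')
-- ===== SOURCE B (Python) =====
-- def remove_nested_curly_braces(text):
--     substring_to_remove = """.IRPP_ruby , .IRPP_ruby .postImageUrl , .IRPP_ruby .centered-text-area  .IRPP_ruby , .IRPP_ruby:hover , .IRPP_ruby:visited , .IRPP_ruby:active  .IRPP_ruby .clearfix:after  .IRPP_ruby  .IRPP_ruby:active , .IRPP_ruby:hover  .IRPP_ruby .postImageUrl  .IRPP_ruby .centered-text-area  .IRPP_ruby .centered-text  .IRPP_ruby .IRPP_ruby-content  .IRPP_ruby .ctaText  .IRPP_ruby .postTitle  .IRPP_ruby .ctaButton  .IRPP_ruby .ctaButton  .IRPP_ruby:after"""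
--     # Stage 1: pair up braces by position and collect the removed spans [s, e]
--     # (outermost matched blocks, each stray top-level '}', and an unmatched-'{' tail).
--     spans = []
--     stack = []
--     for i, ch in enumerate(text):
--         if ch == '{':
--             stack.append(i)
--         elif ch == '}':
--             if stack:
--                 s = stack.pop()
--                 if not stack:
--                     spans.append((s, i))
--             else:
--                 spans.append((i, i))
--     if stack:
--         spans.append((stack[0], len(text)))
--     # Stage 2: concatenate the slices of text between consecutive spans.
--     pieces = []
--     pos = 0
--     for s, e in spans:
--         pieces.append(text[pos:s])
--         pos = e + 1
--     pieces.append(text[pos:])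
--     return ''.join(pieces).replace(substring_to_remove, '')
-- ===== Notes on version B (the rewrite author's own statement) =====
-- stated objective: faster
-- what changed: Instead of filtering characters one by one through a stack machine with list-slicing truncation, B first pairs braces by position to build the list of removed spans (outermost blocks, stray top-level '}', unmatched-'{' tail) and then concatenates the text slices between consecutive spans.
import Mathlib
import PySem

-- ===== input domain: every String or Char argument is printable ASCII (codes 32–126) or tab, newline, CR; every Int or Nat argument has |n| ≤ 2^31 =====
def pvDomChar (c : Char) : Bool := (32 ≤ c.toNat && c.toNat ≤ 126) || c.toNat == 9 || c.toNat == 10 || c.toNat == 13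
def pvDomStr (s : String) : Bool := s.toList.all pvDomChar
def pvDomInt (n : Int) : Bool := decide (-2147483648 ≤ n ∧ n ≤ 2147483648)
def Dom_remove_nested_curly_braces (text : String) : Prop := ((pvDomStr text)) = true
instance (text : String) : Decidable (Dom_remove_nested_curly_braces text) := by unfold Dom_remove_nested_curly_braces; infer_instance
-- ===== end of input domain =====

-- B replaces A's per-character stack machine (with its list-slicing truncation) by a two-stage
-- algorithm: first pair up braces by position to collect the removed spans, then concatenate the
-- slices of the text between consecutive spans; the objective is speed.

-- the CSS substring both versions strip at the end (same literal in Source A and Source B)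
def pvSubToRemove : String := ".IRPP_ruby , .IRPP_ruby .postImageUrl , .IRPP_ruby .centered-text-area  .IRPP_ruby , .IRPP_ruby:hover , .IRPP_ruby:visited , .IRPP_ruby:active  .IRPP_ruby .clearfix:after  .IRPP_ruby  .IRPP_ruby:active , .IRPP_ruby:hover  .IRPP_ruby .postImageUrl  .IRPP_ruby .centered-text-area  .IRPP_ruby .centered-text  .IRPP_ruby .IRPP_ruby-content  .IRPP_ruby .ctaText  .IRPP_ruby .postTitle  .IRPP_ruby .ctaButton  .IRPP_ruby .ctaButton  .IRPP_ruby:after"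

-- ===== PORT A =====
-- state = (stack of saved result-lengths, result); Python's stack.append/pop = cons/head here
def pvStepA (s : List Nat × List Char) (c : Char) : List Nat × List Char :=
  if c = '{' then (s.2.length :: s.1, s.2)
  else if c = '}' then
    match s.1 with
    | [] => s
    | start :: rest => (rest, s.2.take start)   -- result = result[:start_index]
  else if s.1 = [] then (s.1, s.2 ++ [c]) else s

def remove_nested_curly_braces (text : String) : String :=
  PySem.Str.replace (String.ofList (text.toList.foldl pvStepA ([], [])).2) pvSubToRemove ""

-- ===== PORT B =====
-- Stage-1 step over enumerate(text): state = (spans, stack of open positions);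
-- Python pushes/pops at the list end, so the cons-head is the stack top and
-- Python's stack[0] is getLast? here.
def pvStep1 (st : List (Int × Int) × List Int) (p : Int × Char) : List (Int × Int) × List Int :=
  if p.2 = '{' then (st.1, p.1 :: st.2)
  else if p.2 = '}' then
    match st.2 with
    | [] => (st.1 ++ [(p.1, p.1)], [])
    | s :: rest => if rest = [] then (st.1 ++ [(s, p.1)], []) else (st.1, rest)
  else st

def pvSpans (l : List Char) : List (Int × Int) :=
  let r := List.foldl pvStep1 ([], []) (PySem.List.enumerate l)
  match r.2.getLast? with
  | some s => r.1 ++ [(s, (l.length : Int))]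
  | none => r.1

-- Stage-2 step: pieces.append(text[pos:s]); pos = e + 1
def pvStep2 (l : List Char) (st : List (List Char) × Int) (sp : Int × Int) : List (List Char) × Int :=
  (st.1 ++ [PySem.List.slice l (some st.2) (some sp.1)], sp.2 + 1)

def remove_nested_curly_braces_alt (text : String) : String :=
  let l := text.toList
  let r := List.foldl (pvStep2 l) ([], 0) (pvSpans l)
  PySem.Str.replace (String.ofList ((r.1 ++ [PySem.List.slice l (some r.2) none]).flatten)) pvSubToRemove ""

-- ===== PRECONDITION & SPEC =====
def Spec_remove_nested_curly_braces (text : String) (out : String) : Prop := out = remove_nested_curly_braces_alt text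
instance (text : String) (out : String) : Decidable (Spec_remove_nested_curly_braces text out) := by unfold Spec_remove_nested_curly_braces; infer_instance

-- ===== CLAIM (what is proved, stated in full; the proofs are below) =====
def Claim_equal_remove_nested_curly_braces : Prop := ∀ (text : String), Dom_remove_nested_curly_braces text → Spec_remove_nested_curly_braces text (remove_nested_curly_braces text)

-- ===== LEMMAS AND PROOFS =====

-- pvSkip d tl = number of characters consumed until (and including) the '}' matching an
-- already-open group of depth d; tl.length if there is none.
def pvSkip (d : Nat) : List Char → Nat
  | [] => 0
  | c :: tl => if c = '{' then pvSkip (d+1) tl + 1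
               else if c = '}' then (if d = 1 then 1 else pvSkip (d-1) tl + 1)
               else pvSkip d tl + 1

-- whether that matching '}' exists
def pvFound (d : Nat) : List Char → Bool
  | [] => false
  | c :: tl => if c = '{' then pvFound (d+1) tl
               else if c = '}' then (if d = 1 then true else pvFound (d-1) tl)
               else pvFound d tl

theorem pvSkip_le (d : Nat) (tl : List Char) : pvSkip d tl ≤ tl.length := by
  induction tl generalizing d with
  | nil => simp [pvSkip]
  | cons c tl ih =>
    simp only [pvSkip, List.length_cons]
    split_ifs
    · have := ih (d+1); omega
    · omega
    · have := ih (d-1); omega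
    · have := ih d; omega

-- the common recursive specification: keep top-level non-brace characters, skip blocks
def pvGo : List Char → List Char
  | [] => []
  | c :: tl => if c = '{' then pvGo (tl.drop (pvSkip 1 tl))
               else if c = '}' then pvGo tl
               else c :: pvGo tl
termination_by l => l.length
decreasing_by
  · simp only [List.length_drop, List.length_cons]; omega
  · simp only [List.length_cons]; omega
  · simp only [List.length_cons]; omega

theorem pvSkip_of_not_found (d : Nat) (tl : List Char) (h : pvFound d tl = false) :
    pvSkip d tl = tl.length := by
  induction tl generalizing d with
  | nil => simp [pvSkip]
  | cons c tl ih =>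
    simp only [pvSkip, pvFound, List.length_cons] at *
    split_ifs at h ⊢ <;> simp_all

-- ---------- A side ----------

-- skip phase of A: while the stack is nonempty nothing is appended and every truncation is a
-- no-op (each saved index equals the current result length)
theorem pvA_skip (tl : List Char) : ∀ (st : List Nat) (res : List Char), st ≠ [] →
    (∀ x ∈ st, x = res.length) →
    (List.foldl pvStepA (st, res) tl).2
      = (List.foldl pvStepA ([], res) (tl.drop (pvSkip st.length tl))).2 := by
  induction tl with
  | nil => intro st res _ _; simp [pvSkip]
  | cons c tl ih =>
    intro st res hne hinv
    by_cases hb : c = '{'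
    · have hstep : pvStepA (st, res) c = (res.length :: st, res) := by simp [pvStepA, hb]
      have hsk : pvSkip st.length (c :: tl) = pvSkip (st.length + 1) tl + 1 := by
        simp [pvSkip, hb]
      rw [List.foldl_cons, hstep, hsk, List.drop_succ_cons]
      have hmem : ∀ x ∈ (res.length :: st), x = res.length := by
        intro x hx
        rcases List.mem_cons.mp hx with h1 | h1
        · exact h1
        · exact hinv x h1
      have h2 := ih (res.length :: st) res (by simp) hmem
      simpa using h2
    · by_cases hc : c = '}'
      · cases st with
        | nil => exact absurd rfl hne
        | cons x rest =>
          have hx : x = res.length := hinv x (by simp)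
          have hstep : pvStepA (x :: rest, res) c = (rest, res) := by
            simp [pvStepA, hc, hx, List.take_length]
          rw [List.foldl_cons, hstep]
          cases rest with
          | nil =>
            have hsk : pvSkip (x :: ([] : List Nat)).length (c :: tl) = 1 := by
              simp [pvSkip, hc]
            rw [hsk]
            rfl
          | cons y rest' =>
            have hlen : (x :: y :: rest').length ≠ 1 := by simp
            have hsk : pvSkip (x :: y :: rest').length (c :: tl)
                = pvSkip (y :: rest').length tl + 1 := by
              simp only [pvSkip, if_neg (by simp [hb] : ¬ c = '{'), if_pos hc, if_neg hlen]
              simp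
            rw [hsk, List.drop_succ_cons]
            exact ih (y :: rest') res (by simp)
              (fun z hz => hinv z (List.mem_cons_of_mem x hz))
      · have hstep : pvStepA (st, res) c = (st, res) := by
          cases st with
          | nil => exact absurd rfl hne
          | cons x rest => simp [pvStepA, hb, hc]
        have hsk : pvSkip st.length (c :: tl) = pvSkip st.length tl + 1 := by
          simp [pvSkip, hb, hc]
        rw [List.foldl_cons, hstep, hsk, List.drop_succ_cons]
        exact ih st res hne hinv

theorem pvA_go (n : Nat) : ∀ (l : List Char), l.length ≤ n → ∀ (res : List Char),
    (List.foldl pvStepA ([], res) l).2 = res ++ pvGo l := by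
  induction n with
  | zero =>
    intro l hl res
    cases l with
    | nil => simp [pvGo]
    | cons c tl => simp at hl
  | succ n ih =>
    intro l hl res
    cases l with
    | nil => simp [pvGo]
    | cons c tl =>
      by_cases hb : c = '{'
      · have hstep : pvStepA ([], res) c = ([res.length], res) := by simp [pvStepA, hb]
        have hsp := pvA_skip tl [res.length] res (by simp) (by simp)
        simp only [List.length_cons, List.length_nil, Nat.zero_add] at hsp
        have hlen : (tl.drop (pvSkip 1 tl)).length ≤ n := by
          have := pvSkip_le 1 tl; simp at hl ⊢; omega
        rw [List.foldl_cons, hstep, hsp, ih _ hlen res]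
        simp [pvGo, hb]
      · by_cases hc : c = '}'
        · have hstep : pvStepA ([], res) c = ([], res) := by simp [pvStepA, hb, hc]
          rw [List.foldl_cons, hstep, ih tl (by simp at hl; omega) res]
          simp [pvGo, hb, hc]
        · have hstep : pvStepA ([], res) c = ([], res ++ [c]) := by simp [pvStepA, hb, hc]
          rw [List.foldl_cons, hstep, ih tl (by simp at hl; omega) (res ++ [c])]
          simp [pvGo, hb, hc]

-- ---------- B side, stage 1 ----------

-- stage-1 folds only ever append to the spans component
theorem pvStep1_acc (e : List (Int × Char)) : ∀ (spans : List (Int × Int)) (st : List Int),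
    List.foldl pvStep1 (spans, st) e
      = (spans ++ (List.foldl pvStep1 ([], st) e).1, (List.foldl pvStep1 ([], st) e).2) := by
  induction e with
  | nil => intro spans st; simp
  | cons p e ih =>
    intro spans st
    have hstep : ∀ s0 : List (Int × Int),
        pvStep1 (s0, st) p = (s0 ++ (pvStep1 ([], st) p).1, (pvStep1 ([], st) p).2) := by
      intro s0
      simp only [pvStep1]
      split_ifs
      · simp
      · cases st with
        | nil => simp
        | cons x rest => by_cases h : rest = [] <;> simp [h]
      · simp
    rw [List.foldl_cons, hstep spans, List.foldl_cons, hstep [], List.nil_append,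
        ih (spans ++ _), ih ((pvStep1 ([], st) p).1)]
    simp

-- skip phase of B's stage 1: with a nonempty stack (bottom element b), nothing is emitted until
-- the matching '}', which emits (b, close-index) and empties the stack; if there is no matching
-- '}', the stack stays nonempty with the same bottom and no span is emitted.
theorem pvB_skip (tl : List Char) : ∀ (i0 : Int) (st : List Int) (spans : List (Int × Int)) (b : Int),
    st ≠ [] → st.getLast? = some b →
    (pvFound st.length tl = true →
      List.foldl pvStep1 (spans, st) (PySem.List.enumerate tl i0)
        = List.foldl pvStep1 (spans ++ [(b, i0 + (pvSkip st.length tl : Int) - 1)], [])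
            (PySem.List.enumerate (tl.drop (pvSkip st.length tl)) (i0 + (pvSkip st.length tl : Int))))
    ∧ (pvFound st.length tl = false →
      (List.foldl pvStep1 (spans, st) (PySem.List.enumerate tl i0)).1 = spans
      ∧ (List.foldl pvStep1 (spans, st) (PySem.List.enumerate tl i0)).2.getLast? = some b
      ∧ (List.foldl pvStep1 (spans, st) (PySem.List.enumerate tl i0)).2 ≠ []) := by
  induction tl with
  | nil =>
    intro i0 st spans b hne hlast
    refine ⟨fun h => by simp [pvFound] at h, fun _ => ?_⟩
    simp [PySem.List.enumerate_nil, hlast, hne]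
  | cons c tl ih =>
    intro i0 st spans b hne hlast
    rw [PySem.List.enumerate_cons, List.foldl_cons]
    by_cases hb : c = '{'
    · have hstep : pvStep1 (spans, st) (i0, c) = (spans, i0 :: st) := by simp [pvStep1, hb]
      rw [hstep]
      have hsk : pvSkip st.length (c :: tl) = pvSkip (st.length + 1) tl + 1 := by
        simp [pvSkip, hb]
      have hfd : pvFound st.length (c :: tl) = pvFound (st.length + 1) tl := by
        simp [pvFound, hb]
      have hlast' : (i0 :: st).getLast? = some b := by
        cases st with
        | nil => exact absurd rfl hne
        | cons x rest => simpa [List.getLast?_cons] using hlast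
      have hih := ih (i0 + 1) (i0 :: st) spans b (by simp) hlast'
      simp only [List.length_cons] at hih
      constructor
      · intro hf
        have heq := hih.1 (by rw [← hfd]; exact hf)
        rw [heq, hsk]
        have e1 : i0 + ((pvSkip (st.length + 1) tl + 1 : Nat) : Int) - 1
            = i0 + 1 + (pvSkip (st.length + 1) tl : Int) - 1 := by push_cast; ring
        have e2 : i0 + ((pvSkip (st.length + 1) tl + 1 : Nat) : Int)
            = i0 + 1 + (pvSkip (st.length + 1) tl : Int) := by push_cast; ring
        rw [e1, e2, List.drop_succ_cons]
      · intro hf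
        exact hih.2 (by rw [← hfd]; exact hf)
    · by_cases hc : c = '}'
      · cases st with
        | nil => exact absurd rfl hne
        | cons x rest =>
          cases rest with
          | nil =>
            have hbx : x = b := by simpa using hlast
            have hstep : pvStep1 (spans, [x]) (i0, c) = (spans ++ [(x, i0)], []) := by
              simp [pvStep1, hb, hc]
            rw [hstep]
            have hsk : pvSkip (x :: ([] : List Int)).length (c :: tl) = 1 := by
              simp [pvSkip, hc]
            constructor
            · intro _
              rw [hsk]
              have e1 : i0 + ((1 : Nat) : Int) - 1 = i0 := by push_cast; ring
              have e2 : i0 + ((1 : Nat) : Int) = i0 + 1 := by push_cast; ring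
              rw [e1, e2, hbx]
              rfl
            · intro hf
              have : pvFound (x :: ([] : List Int)).length (c :: tl) = true := by
                simp [pvFound, hc]
              rw [this] at hf; exact absurd hf (by simp)
          | cons y rest' =>
            have hlen1 : (x :: y :: rest').length ≠ 1 := by simp
            have hstep : pvStep1 (spans, x :: y :: rest') (i0, c) = (spans, y :: rest') := by
              simp [pvStep1, hb, hc]
            rw [hstep]
            have hsk : pvSkip (x :: y :: rest').length (c :: tl)
                = pvSkip (y :: rest').length tl + 1 := by
              simp only [pvSkip, if_neg (by simp [hb] : ¬ c = '{'), if_pos hc, if_neg hlen1]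
              simp
            have hfd : pvFound (x :: y :: rest').length (c :: tl)
                = pvFound (y :: rest').length tl := by
              simp only [pvFound, if_neg (by simp [hb] : ¬ c = '{'), if_pos hc, if_neg hlen1]
              simp
            have hlast' : (y :: rest').getLast? = some b := by
              simpa [List.getLast?_cons] using hlast
            have hih := ih (i0 + 1) (y :: rest') spans b (by simp) hlast'
            constructor
            · intro hf
              have heq := hih.1 (by rw [← hfd]; exact hf)
              rw [heq, hsk]
              have e1 : i0 + ((pvSkip (y :: rest').length tl + 1 : Nat) : Int) - 1
                  = i0 + 1 + (pvSkip (y :: rest').length tl : Int) - 1 := by push_cast; ring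
              have e2 : i0 + ((pvSkip (y :: rest').length tl + 1 : Nat) : Int)
                  = i0 + 1 + (pvSkip (y :: rest').length tl : Int) := by push_cast; ring
              rw [e1, e2, List.drop_succ_cons]
            · intro hf
              exact hih.2 (by rw [← hfd]; exact hf)
      · have hstep : pvStep1 (spans, st) (i0, c) = (spans, st) := by
          cases st with
          | nil => exact absurd rfl hne
          | cons x rest => simp [pvStep1, hb, hc]
        rw [hstep]
        have hsk : pvSkip st.length (c :: tl) = pvSkip st.length tl + 1 := by
          simp [pvSkip, hb, hc]
        have hfd : pvFound st.length (c :: tl) = pvFound st.length tl := by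
          simp [pvFound, hb, hc]
        have hih := ih (i0 + 1) st spans b hne hlast
        constructor
        · intro hf
          have heq := hih.1 (by rw [← hfd]; exact hf)
          rw [heq, hsk]
          have e1 : i0 + ((pvSkip st.length tl + 1 : Nat) : Int) - 1
              = i0 + 1 + (pvSkip st.length tl : Int) - 1 := by push_cast; ring
          have e2 : i0 + ((pvSkip st.length tl + 1 : Nat) : Int)
              = i0 + 1 + (pvSkip st.length tl : Int) := by push_cast; ring
          rw [e1, e2, List.drop_succ_cons]
        · intro hf
          exact hih.2 (by rw [← hfd]; exact hf)

-- stage 1 from an arbitrary start offset, with the closing of an unmatched-'{' tail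
def pvSpansFrom (n : Int) (i0 : Int) (l : List Char) : List (Int × Int) :=
  let r := List.foldl pvStep1 ([], []) (PySem.List.enumerate l i0)
  match r.2.getLast? with
  | some s => r.1 ++ [(s, n)]
  | none => r.1

theorem pvSpansFrom_nil (n i0 : Int) : pvSpansFrom n i0 [] = [] := by
  simp [pvSpansFrom, PySem.List.enumerate_nil]

theorem pvSpansFrom_other (n i0 : Int) (c : Char) (tl : List Char)
    (hb : c ≠ '{') (hc : c ≠ '}') :
    pvSpansFrom n i0 (c :: tl) = pvSpansFrom n (i0 + 1) tl := by
  simp only [pvSpansFrom, PySem.List.enumerate_cons, List.foldl_cons]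
  have : pvStep1 ([], []) (i0, c) = ([], []) := by simp [pvStep1, hb, hc]
  rw [this]

theorem pvSpansFrom_close (n i0 : Int) (tl : List Char) :
    pvSpansFrom n i0 ('}' :: tl) = (i0, i0) :: pvSpansFrom n (i0 + 1) tl := by
  simp only [pvSpansFrom, PySem.List.enumerate_cons, List.foldl_cons]
  have hstep : pvStep1 ([], []) (i0, '}') = ([(i0, i0)], []) := by simp [pvStep1]
  rw [hstep, pvStep1_acc]
  cases h : (List.foldl pvStep1 ([], []) (PySem.List.enumerate tl (i0 + 1))).2.getLast? <;>
    simp [h]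

theorem pvSpansFrom_open_found (n i0 : Int) (tl : List Char) (hf : pvFound 1 tl = true) :
    pvSpansFrom n i0 ('{' :: tl)
      = (i0, i0 + (pvSkip 1 tl : Int))
          :: pvSpansFrom n (i0 + 1 + (pvSkip 1 tl : Int)) (tl.drop (pvSkip 1 tl)) := by
  simp only [pvSpansFrom, PySem.List.enumerate_cons, List.foldl_cons]
  have hstep : pvStep1 ([], []) (i0, '{') = ([], [i0]) := by simp [pvStep1]
  rw [hstep]
  have hbs := (pvB_skip tl (i0 + 1) [i0] [] i0 (by simp) (by simp)).1
  simp only [List.length_cons, List.length_nil, Nat.zero_add] at hbs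
  rw [hbs hf, pvStep1_acc]
  have e1 : i0 + 1 + (pvSkip 1 tl : Int) - 1 = i0 + (pvSkip 1 tl : Int) := by ring
  rw [e1]
  cases h : (List.foldl pvStep1 ([], [])
      (PySem.List.enumerate (tl.drop (pvSkip 1 tl)) (i0 + 1 + (pvSkip 1 tl : Int)))).2.getLast? <;>
    simp [h]

theorem pvSpansFrom_open_not_found (n i0 : Int) (tl : List Char) (hf : pvFound 1 tl = false) :
    pvSpansFrom n i0 ('{' :: tl) = [(i0, n)] := by
  simp only [pvSpansFrom, PySem.List.enumerate_cons, List.foldl_cons]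
  have hstep : pvStep1 ([], []) (i0, '{') = ([], [i0]) := by simp [pvStep1]
  rw [hstep]
  have hbs := (pvB_skip tl (i0 + 1) [i0] [] i0 (by simp) (by simp)).2
  simp only [List.length_cons, List.length_nil, Nat.zero_add] at hbs
  rcases hbs hf with ⟨h1, h2, _⟩
  simp [h1, h2]

-- every span emitted from offset i0 starts at or after i0
theorem pvStep1_inv (e : List (Int × Char)) (i0 : Int) :
    ∀ (spans : List (Int × Int)) (st : List Int),
    (∀ x ∈ st, i0 ≤ x) → (∀ sp ∈ spans, i0 ≤ sp.1) → (∀ p ∈ e, i0 ≤ p.1) →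
    (∀ x ∈ (List.foldl pvStep1 (spans, st) e).2, i0 ≤ x)
    ∧ (∀ sp ∈ (List.foldl pvStep1 (spans, st) e).1, i0 ≤ sp.1) := by
  induction e with
  | nil => intro spans st h1 h2 _; exact ⟨h1, h2⟩
  | cons p e ih =>
    intro spans st h1 h2 h3
    rw [List.foldl_cons]
    have hp : i0 ≤ p.1 := h3 p (by simp)
    have h3' : ∀ q ∈ e, i0 ≤ q.1 := fun q hq => h3 q (by simp [hq])
    simp only [pvStep1]
    split_ifs with hbr hcl
    · refine ih spans (p.1 :: st) ?_ h2 h3'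
      intro x hx
      rcases List.mem_cons.mp hx with h | h
      · exact h ▸ hp
      · exact h1 x h
    · cases st with
      | nil =>
        refine ih (spans ++ [(p.1, p.1)]) [] (by simp) ?_ h3'
        intro sp hsp
        rcases List.mem_append.mp hsp with h | h
        · exact h2 sp h
        · simp at h
          rw [h]
          exact hp
      | cons x rest =>
        by_cases hr : rest = []
        · subst hr
          simp only [if_pos rfl]
          refine ih (spans ++ [(x, p.1)]) [] (by simp) ?_ h3'
          intro sp hsp
          rcases List.mem_append.mp hsp with h | h
          · exact h2 sp h
          · have hx := h1 x (by simp)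
            simp at h
            rw [h]
            exact hx
        · simp only [if_neg hr]
          exact ih spans rest (fun z hz => h1 z (by simp [hz])) h2 h3'
    · exact ih spans st h1 h2 h3'

theorem pvSpansFrom_lb (l : List Char) (n i0 : Int) :
    ∀ sp ∈ pvSpansFrom n i0 l, i0 ≤ sp.1 := by
  intro sp hsp
  have hidx : ∀ p ∈ PySem.List.enumerate l i0, i0 ≤ p.1 := by
    intro p hp
    rcases (PySem.List.mem_enumerate_iff _ _ _).mp hp with ⟨k, hk, rfl⟩
    omega
  have hinv := pvStep1_inv (PySem.List.enumerate l i0) i0 [] [] (by simp) (by simp) hidx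
  simp only [pvSpansFrom] at hsp
  cases h : (List.foldl pvStep1 ([], []) (PySem.List.enumerate l i0)).2.getLast? with
  | none => rw [h] at hsp; exact hinv.2 sp hsp
  | some s =>
    rw [h] at hsp
    rcases List.mem_append.mp hsp with hm | hm
    · exact hinv.2 sp hm
    · have hs : i0 ≤ s := hinv.1 s (List.mem_of_getLast? h)
      simp at hm
      rw [hm]
      exact hs

-- ---------- B side, stage 2 ----------

-- the assembled output as a function of the span list
def pvAsm (bigl : List Char) (pos : Int) : List (Int × Int) → List Char
  | [] => PySem.List.slice bigl (some pos) none
  | (s, e) :: rest => PySem.List.slice bigl (some pos) (some s) ++ pvAsm bigl (e + 1) rest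

theorem pvAsm_eq (bigl : List Char) (sps : List (Int × Int)) :
    ∀ (P0 : List (List Char)) (pos : Int),
    ((List.foldl (pvStep2 bigl) (P0, pos) sps).1
      ++ [PySem.List.slice bigl (some (List.foldl (pvStep2 bigl) (P0, pos) sps).2) none]).flatten
    = P0.flatten ++ pvAsm bigl pos sps := by
  induction sps with
  | nil => intro P0 pos; simp [pvAsm]
  | cons sp rest ih =>
    intro P0 pos
    obtain ⟨s, e⟩ := sp
    rw [List.foldl_cons]
    have hstep : pvStep2 bigl (P0, pos) (s, e)
        = (P0 ++ [PySem.List.slice bigl (some pos) (some s)], e + 1) := rfl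
    rw [hstep, ih]
    simp [pvAsm]

-- prepending one kept character to the assembly: all spans start strictly later
theorem pvAsm_cons (bigl : List Char) (i0 : Nat) (hi0 : i0 < bigl.length)
    (sps : List (Int × Int)) (hlb : ∀ sp ∈ sps, (i0 : Int) + 1 ≤ sp.1) :
    pvAsm bigl (i0 : Int) sps = bigl[i0] :: pvAsm bigl ((i0 : Int) + 1) sps := by
  cases sps with
  | nil =>
    simp only [pvAsm]
    rw [show ((i0 : Int) + 1) = ((i0 + 1 : Nat) : Int) by push_cast; ring,
        PySem.List.slice_from_natCast, PySem.List.slice_from_natCast]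
    rw [List.drop_eq_getElem_cons hi0]
  | cons sp rest =>
    obtain ⟨s, e⟩ := sp
    have hs : (i0 : Int) + 1 ≤ s := hlb (s, e) (by simp)
    simp only [pvAsm]
    rw [show ((i0 : Int) + 1) = ((i0 + 1 : Nat) : Int) by push_cast; ring,
        show s = ((s.toNat : Nat) : Int) by omega,
        PySem.List.slice_natCast, PySem.List.slice_natCast]
    have h1 : i0 < s.toNat := by omega
    rw [List.drop_eq_getElem_cons hi0]
    have h2 : s.toNat - i0 = (s.toNat - (i0 + 1)) + 1 := by omega
    rw [h2, List.take_succ_cons]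
    simp

-- empty slice when both bounds coincide
theorem pvSlice_self (bigl : List Char) (i : Int) (h : 0 ≤ i) :
    PySem.List.slice bigl (some i) (some i) = [] := by
  rw [show i = ((i.toNat : Nat) : Int) by omega, PySem.List.slice_natCast]
  simp

-- stage 1 + stage 2 compute the recursive specification
theorem pvB_go (m : Nat) : ∀ (bigl : List Char) (i0 : Nat), bigl.length - i0 ≤ m →
    pvAsm bigl (i0 : Int) (pvSpansFrom (bigl.length : Int) (i0 : Int) (bigl.drop i0))
      = pvGo (bigl.drop i0) := by
  induction m with
  | zero =>
    intro bigl i0 h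
    have hd : bigl.drop i0 = [] := by
      apply List.drop_eq_nil_of_le; omega
    rw [hd, pvSpansFrom_nil]
    simp only [pvAsm, pvGo]
    rw [PySem.List.slice_from_natCast, hd]
  | succ m ih =>
    intro bigl i0 h
    cases hd : bigl.drop i0 with
    | nil =>
      rw [pvSpansFrom_nil]
      simp only [pvAsm, pvGo]
      rw [PySem.List.slice_from_natCast, hd]
    | cons c tl =>
      have hi0 : i0 < bigl.length := by
        by_contra hcon
        rw [List.drop_eq_nil_of_le (by omega)] at hd; simp at hd
      have hc : bigl[i0] = c := by
        have h0 : (bigl.drop i0)[0]? = some c := by rw [hd]; rfl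
        rw [List.getElem?_drop] at h0
        simpa [List.getElem?_eq_getElem hi0] using h0
      have htl : bigl.drop (i0 + 1) = tl := by
        have h0 : (bigl.drop i0).tail = tl := by rw [hd]; rfl
        rwa [List.tail_drop] at h0
      by_cases hbr : c = '{'
      · subst hbr
        by_cases hf : pvFound 1 tl = true
        · rw [pvSpansFrom_open_found _ _ _ hf]
          simp only [pvAsm]
          rw [pvSlice_self _ _ (by positivity), List.nil_append]
          have harith : (i0 : Int) + (pvSkip 1 tl : Int) + 1 = ((i0 + 1 + pvSkip 1 tl : Nat) : Int) := by
            push_cast; ring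
          have harith2 : (i0 : Int) + 1 + (pvSkip 1 tl : Int) = ((i0 + 1 + pvSkip 1 tl : Nat) : Int) := by
            push_cast; ring
          have hdd : tl.drop (pvSkip 1 tl) = bigl.drop (i0 + 1 + pvSkip 1 tl) := by
            rw [← htl, List.drop_drop]
          have hmq : bigl.length - (i0 + 1 + pvSkip 1 tl) ≤ m := by omega
          rw [harith, harith2, hdd, ih bigl (i0 + 1 + pvSkip 1 tl) hmq, ← hdd]
          rw [show pvGo ('{' :: tl) = pvGo (tl.drop (pvSkip 1 tl)) by rw [pvGo]; simp]
        · rw [pvSpansFrom_open_not_found _ _ _ (by simpa using hf)]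
          simp only [pvAsm]
          rw [pvSlice_self _ _ (by positivity), List.nil_append]
          rw [show (bigl.length : Int) + 1 = ((bigl.length + 1 : Nat) : Int) by push_cast; ring,
              PySem.List.slice_from_natCast, List.drop_eq_nil_of_le (by omega)]
          have hsk : pvSkip 1 tl = tl.length := pvSkip_of_not_found 1 tl (by simpa using hf)
          rw [show pvGo ('{' :: tl) = pvGo (tl.drop (pvSkip 1 tl)) by rw [pvGo]; simp, hsk]
          simp [pvGo]
      · by_cases hcl : c = '}'
        · subst hcl
          rw [pvSpansFrom_close]
          simp only [pvAsm]
          rw [pvSlice_self _ _ (by positivity), List.nil_append]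
          rw [show (i0 : Int) + 1 = ((i0 + 1 : Nat) : Int) by push_cast; ring, ← htl]
          rw [ih bigl (i0 + 1) (by omega), htl]
          rw [pvGo]
          simp
        · rw [pvSpansFrom_other _ _ _ _ hbr hcl]
          have hlb : ∀ sp ∈ pvSpansFrom (bigl.length : Int) ((i0 : Int) + 1) tl,
              (i0 : Int) + 1 ≤ sp.1 := pvSpansFrom_lb tl _ _
          rw [pvAsm_cons bigl i0 hi0 _ hlb, hc]
          rw [show (i0 : Int) + 1 = ((i0 + 1 : Nat) : Int) by push_cast; ring, ← htl]
          rw [ih bigl (i0 + 1) (by omega), htl]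
          rw [pvGo]
          simp [hbr, hcl]

-- ===== VERDICT (by name: the statement is the Claim_ definition above) =====
theorem remove_nested_curly_braces_spec : Claim_equal_remove_nested_curly_braces := by
  intro text _
  unfold Spec_remove_nested_curly_braces remove_nested_curly_braces remove_nested_curly_braces_alt
  have hA : (text.toList.foldl pvStepA ([], [])).2 = pvGo text.toList := by
    simpa using pvA_go text.toList.length text.toList le_rfl []
  have hSp : pvSpans text.toList = pvSpansFrom (text.toList.length : Int) 0 text.toList := by
    simp [pvSpans, pvSpansFrom]
  have hB : ((List.foldl (pvStep2 text.toList) ([], 0) (pvSpans text.toList)).1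
      ++ [PySem.List.slice text.toList
            (some (List.foldl (pvStep2 text.toList) ([], 0) (pvSpans text.toList)).2) none]).flatten
      = pvGo text.toList := by
    rw [pvAsm_eq]
    rw [hSp, show (0 : Int) = ((0 : Nat) : Int) by rfl]
    have hbg := pvB_go text.toList.length text.toList 0 (by omega)
    simpa using hbg
  simp only []
  rw [hA, hB]
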